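-- pv_equiv track=rewrite | github.com/BowenBryanWang/AutoTask | src/knowledge.py | process_sequences
-- ===== SOURCE A (Python) =====
-- def find_consecutive_back_sequences(action_desc):
--     sequences = []
--     current_sequence = []
--     for i, action in enumerate(action_desc):
--         if action == 'BACK':
--             current_sequence.append(i)
--         else:
--             if current_sequence:
--                 sequences.append(current_sequence)
--                 current_sequence = []
--     if current_sequence:  # Adding the last sequence if it ends with 'Back'
--         sequences.append(current_sequence)
--     return sequences
--
-- def process_sequences(pages, action, action_desc):
--     back_sequences = find_consecutive_back_sequences(action_desc)
--     l = []
--     for sequence in back_sequences: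
--         start = sequence[0]
--         end = sequence[-1]+1
--         prev_pages = pages[max(0, start - len(sequence)):min(len(pages), end-len(sequence)+1)]
--         actions = action[start - len(sequence):end-len(sequence)]
--         l.append((prev_pages, actions))
--     return l
-- ===== SOURCE B (Python) =====
-- def process_sequences(pages, action, action_desc):
--     l = []
--     count = 0
--     for i, a in enumerate(action_desc):
--         if a == 'BACK':
--             count += 1
--         elif count:
--             start = i - count
--             l.append((pages[max(0, start - count):min(len(pages), start + 1)],
--                       action[start - count:start]))
--             count = 0
--     if count:
--         start = len(action_desc) - count
--         l.append((pages[max(0, start - count):min(len(pages), start + 1)],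
--                   action[start - count:start]))
--     return l
-- ===== Notes on version B (the rewrite author's own statement) =====
-- stated objective: simpler
-- what changed: Merged the two functions into one single-pass loop over action_desc that keeps only the running BACK count and emits each (pages-slice, action-slice) pair directly when a run ends, instead of first materialising a list of index lists and then iterating over it.
import Mathlib
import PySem

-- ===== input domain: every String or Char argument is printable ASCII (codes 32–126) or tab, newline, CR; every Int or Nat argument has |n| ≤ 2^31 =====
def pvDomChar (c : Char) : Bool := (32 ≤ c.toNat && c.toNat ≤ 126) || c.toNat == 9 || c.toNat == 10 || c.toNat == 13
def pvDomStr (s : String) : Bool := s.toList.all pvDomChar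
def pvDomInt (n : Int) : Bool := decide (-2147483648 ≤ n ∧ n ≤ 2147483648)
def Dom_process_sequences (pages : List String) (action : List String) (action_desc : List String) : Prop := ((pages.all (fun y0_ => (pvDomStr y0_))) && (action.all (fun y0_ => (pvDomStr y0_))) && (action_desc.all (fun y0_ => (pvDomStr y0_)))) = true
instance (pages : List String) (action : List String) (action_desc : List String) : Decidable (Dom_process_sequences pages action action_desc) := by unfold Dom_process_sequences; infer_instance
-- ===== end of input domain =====

-- B merges A's two functions into one single-pass loop that keeps only the
-- running BACK count and emits each slice pair as soon as a run ends (simpler).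

-- ===== PORT A =====
-- the for-loop of find_consecutive_back_sequences as structural recursion over
-- action_desc, carrying the enumerate index i and the loop state (sequences, current_sequence)
def fcbsAux (i : Nat) (seqs : List (List Int)) (cur : List Int) : List String → List (List Int)
  | [] => if cur.isEmpty then seqs else seqs ++ [cur]
  | a :: rest =>
    if a == "BACK" then fcbsAux (i + 1) seqs (cur ++ [(i : Int)]) rest
    else if cur.isEmpty then fcbsAux (i + 1) seqs cur rest
    else fcbsAux (i + 1) (seqs ++ [cur]) [] rest

def find_consecutive_back_sequences (action_desc : List String) : List (List Int) :=
  fcbsAux 0 [] [] action_desc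

def process_sequences (pages : List String) (action : List String) (action_desc : List String) : List (List String × List String) :=
  let back_sequences := find_consecutive_back_sequences action_desc
  back_sequences.foldl (fun l sequence =>
    -- sequence[0] and sequence[-1]: sequences are nonempty by construction, so
    -- headD/getLastD with a dummy default are exact here
    let start : Int := sequence.headD 0
    let e : Int := sequence.getLastD 0 + 1
    let n : Int := sequence.length
    l ++ [(PySem.List.slice pages (some (max 0 (start - n))) (some (min (pages.length : Int) (e - n + 1))),
           PySem.List.slice action (some (start - n)) (some (e - n)))]) []

-- ===== PORT B =====
-- B's emit: the pair appended when a BACK run of length `count` ending just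
-- before position `start + count` finishes (start = i - count)
def psAltEmit (pages action : List String) (start count : Int) : List String × List String :=
  (PySem.List.slice pages (some (max 0 (start - count))) (some (min (pages.length : Int) (start + 1))),
   PySem.List.slice action (some (start - count)) (some start))

-- B's single for-loop as structural recursion, state (l, count), index i
def psAltAux (pages action : List String) (i : Nat) (l : List (List String × List String)) (count : Int) : List String → List (List String × List String)
  | [] => if count ≠ 0 then l ++ [psAltEmit pages action ((i : Int) - count) count] else l
  | a :: rest =>
    if a == "BACK" then psAltAux pages action (i + 1) l (count + 1) rest
    else if count ≠ 0 then psAltAux pages action (i + 1) (l ++ [psAltEmit pages action ((i : Int) - count) count]) 0 rest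
    else psAltAux pages action (i + 1) l count rest

def process_sequences_alt (pages : List String) (action : List String) (action_desc : List String) : List (List String × List String) :=
  psAltAux pages action 0 [] 0 action_desc

-- ===== PRECONDITION & SPEC =====
def Spec_process_sequences (pages : List String) (action : List String) (action_desc : List String) (out : List (List String × List String)) : Prop := out = process_sequences_alt pages action action_desc
instance (pages : List String) (action : List String) (action_desc : List String) (out : List (List String × List String)) : Decidable (Spec_process_sequences pages action action_desc out) := by unfold Spec_process_sequences; infer_instance

-- ===== CLAIM (what is proved, stated in full; the proofs are below) =====
def Claim_equal_process_sequences : Prop := ∀ (pages : List String) (action : List String) (action_desc : List String), Dom_process_sequences pages action action_desc → Spec_process_sequences pages action action_desc (process_sequences pages action action_desc)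

-- ===== LEMMAS AND PROOFS =====

-- A's per-sequence loop body as a function (for reasoning about the foldl)
def emitA (pages action : List String) (sequence : List Int) : List String × List String :=
  let start : Int := sequence.headD 0
  let e : Int := sequence.getLastD 0 + 1
  let n : Int := sequence.length
  (PySem.List.slice pages (some (max 0 (start - n))) (some (min (pages.length : Int) (e - n + 1))),
   PySem.List.slice action (some (start - n)) (some (e - n)))

theorem foldl_emit_eq_map (pages action : List String) :
    ∀ (seqs : List (List Int)) (l : List (List String × List String)),
      seqs.foldl (fun l sequence =>
        let start : Int := sequence.headD 0
        let e : Int := sequence.getLastD 0 + 1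
        let n : Int := sequence.length
        l ++ [(PySem.List.slice pages (some (max 0 (start - n))) (some (min (pages.length : Int) (e - n + 1))),
               PySem.List.slice action (some (start - n)) (some (e - n)))]) l
      = l ++ seqs.map (emitA pages action) := by
  intro seqs
  induction seqs with
  | nil => intro l; simp
  | cons s t ih =>
    intro l
    rw [List.foldl_cons, ih]
    simp [emitA]

-- the run of indices s, s+1, …, s+n-1 as Ints
def intRun (s n : Nat) : List Int := (List.range' s n).map (fun k => (k : Int))

theorem intRun_concat (s n : Nat) : intRun s (n + 1) = intRun s n ++ [((s + n : Nat) : Int)] := by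
  simp [intRun, List.range'_concat]

-- on a nonempty run, A's loop body computes exactly B's emit
theorem emitA_run (pages action : List String) (s n : Nat) (hn : 0 < n) :
    emitA pages action (intRun s n) = psAltEmit pages action (s : Int) (n : Int) := by
  obtain ⟨m, rfl⟩ : ∃ m, n = m + 1 := ⟨n - 1, by omega⟩
  have hhead : (intRun s (m + 1)).headD 0 = (s : Int) := by
    simp [intRun, List.range'_succ]
  have hlast : (intRun s (m + 1)).getLastD 0 = ((s + m : Nat) : Int) := by
    simp [intRun_concat]
  have hlen : ((intRun s (m + 1)).length : Int) = ((m + 1 : Nat) : Int) := by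
    simp [intRun]
  have e2 : ((s + m : Nat) : Int) + 1 - ((m + 1 : Nat) : Int) = (s : Int) := by push_cast; ring
  simp only [emitA, psAltEmit, hhead, hlast, hlen, e2]

theorem main_invariant (pages action : List String) :
    ∀ (rest : List String) (i : Nat) (cur : List Int) (seqs : List (List Int))
      (l : List (List String × List String)),
      cur = intRun (i - cur.length) cur.length →
      cur.length ≤ i →
      l = seqs.map (emitA pages action) →
      (fcbsAux i seqs cur rest).map (emitA pages action)
        = psAltAux pages action i l (cur.length : Int) rest := by
  intro rest
  induction rest with
  | nil =>
    intro i cur seqs l hcur hle hl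
    by_cases h : cur = []
    · subst h; simp [fcbsAux, psAltAux, hl]
    · have hlen : 0 < cur.length := List.length_pos_iff.mpr h
      have hemp : cur.isEmpty = false := by simp [h]
      have hne : ((cur.length : Int)) ≠ 0 := by
        simpa using (by omega : cur.length ≠ 0)
      simp only [fcbsAux, psAltAux, hemp, Bool.false_eq_true, if_false]
      rw [if_pos hne]
      rw [List.map_append, hl]
      congr 1
      simp only [List.map_cons, List.map_nil]
      rw [hcur, emitA_run pages action _ _ hlen]
      have : ((i - cur.length : Nat) : Int) = (i : Int) - (cur.length : Int) := by omega
      rw [this, ← hcur]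
  | cons a rest ih =>
    intro i cur seqs l hcur hle hl
    by_cases hb : a == "BACK"
    · simp only [fcbsAux, psAltAux, hb, if_true]
      have h1 : cur ++ [(i : Int)] = intRun ((i + 1) - (cur ++ [(i : Int)]).length) (cur ++ [(i : Int)]).length := by
        rw [List.length_append, List.length_cons, List.length_nil]
        have : (i + 1) - (cur.length + 0 + 1) = i - cur.length := by omega
        rw [this, intRun_concat]
        rw [← hcur]
        congr 2
        omega
      have h2 := ih (i + 1) (cur ++ [(i : Int)]) seqs l h1 (by simp; omega) hl
      have hc : (((cur ++ [(i : Int)]).length : Nat) : Int) = (cur.length : Int) + 1 := by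
        simp
      rw [h2, hc]
    · simp only [fcbsAux, psAltAux, hb]
      by_cases h : cur = []
      · subst h
        simp only [List.isEmpty_nil, if_true, List.length_nil, Nat.cast_zero]
        rw [if_neg (by simp)]
        exact ih (i + 1) [] seqs l (by simp [intRun]) (by simp) hl
      · have hlen : 0 < cur.length := List.length_pos_iff.mpr h
        have hemp : cur.isEmpty = false := by simp [h]
        have hne : ((cur.length : Int)) ≠ 0 := by
          simpa using (by omega : cur.length ≠ 0)
        simp only [hemp, Bool.false_eq_true, if_false]
        rw [if_pos hne]
        have h2 := ih (i + 1) [] (seqs ++ [cur])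
          (l ++ [psAltEmit pages action ((i : Int) - (cur.length : Int)) (cur.length : Int)])
          (by simp [intRun]) (by simp) ?_
        · exact h2
        · rw [List.map_append, hl]
          congr 1
          simp only [List.map_cons, List.map_nil]
          rw [hcur, emitA_run pages action _ _ hlen]
          have : ((i - cur.length : Nat) : Int) = (i : Int) - (cur.length : Int) := by omega
          rw [this, ← hcur]

-- ===== VERDICT (by name: the statement is the Claim_ definition above) =====
theorem process_sequences_spec : Claim_equal_process_sequences := by
  intro pages action action_desc _
  show process_sequences pages action action_desc = process_sequences_alt pages action action_desc
  unfold process_sequences process_sequences_alt find_consecutive_back_sequences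
  rw [foldl_emit_eq_map]
  simpa using main_invariant pages action action_desc 0 [] [] [] (by simp [intRun]) (by simp) rfl
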